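-- pv_equiv track=rewrite | github.com/erfans-sketch/math-construct-problems | CT8/solution.py | solution
-- ===== SOURCE A (Python) =====
-- def solution(parameters):
--     """
--     Construct an (m+1) x (n+1) labeling matrix for K_{m,n}.
--
--     Label choices (as requested):
--       - Column-part vertices (top row, excluding [0,0]): 1..n
--       - Row-part vertices (first column, excluding [0,0]): (n+1), 2(n+1), ..., m(n+1)
--       - Constant C = (n+1)(m+2)
--       - Edge (i,j) label = C - row_vertex_i - col_vertex_j
--
--     Returns a list of lists with matrix[0][0] = 0.
--     """
--     m = int(parameters.get("m", 1))
--     n = int(parameters.get("n", 1))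
--     if m <= 0 or n <= 0:
--         raise ValueError("m and n must be positive integers")
--
--     # Vertex labels
--     col_vertices = list(range(1, n + 1))
--     row_vertices = [i * (n + 1) for i in range(1, m + 1)]
--
--     # Constant
--     C = (n + 1) * (m + 2)
--
--     # Initialize matrix with zeros
--     matrix = [[0 for _ in range(n + 1)] for _ in range(m + 1)]
--
--     # Place column vertex labels (top row, excluding [0,0])
--     for j in range(n):
--         matrix[0][j + 1] = col_vertices[j]
--
--     # Place row vertex labels (first column, excluding [0,0])
--     for i in range(m):
--         matrix[i + 1][0] = row_vertices[i]
--
--     # Compute and place edge labels in the inner m x n block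
--     for i in range(1, m + 1):
--         for j in range(1, n + 1):
--             matrix[i][j] = C - matrix[i][0] - matrix[0][j]
--
--     return matrix
-- ===== SOURCE B (Python) =====
-- def solution(parameters):
--     m = int(parameters.get("m", 1))
--     n = int(parameters.get("n", 1))
--     if m <= 0 or n <= 0:
--         raise ValueError("m and n must be positive integers")
--     top = list(range(n + 1))
--     C = (n + 1) * (m + 2)
--     # Row 1 of the body; every later row is obtained from the previous one
--     # by an elementwise delta (+ (n+1) in column 0, - (n+1) elsewhere).
--     row = [n + 1] + [C - (n + 1) - j for j in range(1, n + 1)]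
--     rows = [top]
--     for _ in range(m):
--         rows.append(row)
--         row = [row[0] + (n + 1)] + [x - (n + 1) for x in row[1:]]
--     return rows
-- ===== Notes on version B (the rewrite author's own statement) =====
-- stated objective: alternative
-- what changed: Replaces the allocate/fill-borders/read-back matrix construction with an incremental recurrence: only the top row and body row 1 are computed directly, and each subsequent row is derived from the previous row by an elementwise delta (+(n+1) in column 0, -(n+1) elsewhere), carried in a running accumulator.
import Mathlib
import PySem

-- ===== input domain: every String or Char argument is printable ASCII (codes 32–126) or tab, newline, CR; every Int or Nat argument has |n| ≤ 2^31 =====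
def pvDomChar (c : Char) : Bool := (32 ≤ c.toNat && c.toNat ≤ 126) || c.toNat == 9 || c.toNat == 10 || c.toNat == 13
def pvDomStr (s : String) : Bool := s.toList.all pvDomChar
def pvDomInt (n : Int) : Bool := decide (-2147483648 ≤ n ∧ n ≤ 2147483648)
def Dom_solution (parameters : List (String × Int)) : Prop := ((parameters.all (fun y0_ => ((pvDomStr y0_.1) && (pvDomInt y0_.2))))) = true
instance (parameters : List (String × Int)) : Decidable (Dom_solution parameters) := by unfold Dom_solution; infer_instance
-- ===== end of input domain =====

-- B builds the matrix incrementally: only the top row and body row 1 are computed directly,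
-- each later row is derived from the previous one by an elementwise delta (objective: alternative).

-- ===== PORT A =====
-- matrix[i][j] = v; the indices A uses are nonnegative and in range, so pySetD/pyGetD are exact here
def pvSetCell (mat : List (List Int)) (i j : Int) (v : Int) : List (List Int) :=
  PySem.List.pySetD mat i (PySem.List.pySetD (PySem.List.pyGetD mat i []) j v)

-- matrix[i][j] read; the indices A reads are nonnegative and in range, so the defaults are never used
def pvGetCell (mat : List (List Int)) (i j : Int) : Int :=
  PySem.List.pyGetD (PySem.List.pyGetD mat i []) j 0

def solution (parameters : List (String × Int)) : List (List Int) :=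
  let m := PySem.Dict.getD (PySem.Dict.ofList parameters) "m" 1
  let n := PySem.Dict.getD (PySem.Dict.ofList parameters) "n" 1
  if m ≤ 0 ∨ n ≤ 0 then []  -- Python raises ValueError here; excluded by Pre_solution
  else
    let colVertices := PySem.List.pyRange 1 (n + 1) 1
    let rowVertices := (PySem.List.pyRange 1 (m + 1) 1).map (fun i => i * (n + 1))
    let C := (n + 1) * (m + 2)
    let matrix0 := (PySem.List.pyRange 0 (m + 1) 1).map
      (fun _ => (PySem.List.pyRange 0 (n + 1) 1).map (fun _ => (0 : Int)))
    let matrix1 := (PySem.List.pyRange 0 n 1).foldl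
      (fun mat j => pvSetCell mat 0 (j + 1) (PySem.List.pyGetD colVertices j 0)) matrix0
    let matrix2 := (PySem.List.pyRange 0 m 1).foldl
      (fun mat i => pvSetCell mat (i + 1) 0 (PySem.List.pyGetD rowVertices i 0)) matrix1
    let matrix3 := (PySem.List.pyRange 1 (m + 1) 1).foldl
      (fun mat i => (PySem.List.pyRange 1 (n + 1) 1).foldl
        (fun mat j => pvSetCell mat i j (C - pvGetCell mat i 0 - pvGetCell mat 0 j)) mat) matrix2
    matrix3

-- ===== PORT B =====
def solution_alt (parameters : List (String × Int)) : List (List Int) :=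
  let m := PySem.Dict.getD (PySem.Dict.ofList parameters) "m" 1
  let n := PySem.Dict.getD (PySem.Dict.ofList parameters) "n" 1
  if m ≤ 0 ∨ n ≤ 0 then []  -- Python raises ValueError here; excluded by Pre_solution
  else
    let top := PySem.List.pyRange 0 (n + 1) 1
    let C := (n + 1) * (m + 2)
    let row1 := (n + 1) :: (PySem.List.pyRange 1 (n + 1) 1).map (fun j => C - (n + 1) - j)
    -- for _ in range(m): rows.append(row); row = [row[0] + (n+1)] + [x - (n+1) for x in row[1:]]
    let st := (PySem.List.pyRange 0 m 1).foldl
      (fun (st : List (List Int) × List Int) _ =>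
        (st.1 ++ [st.2],
         (PySem.List.pyGetD st.2 0 0 + (n + 1)) ::
           (PySem.List.slice st.2 (some 1) none).map (fun x => x - (n + 1))))
      ([top], row1)
    st.1

-- ===== PRECONDITION & SPEC =====
-- Pre_ excludes exactly the inputs where A raises ValueError: m ≤ 0 or n ≤ 0 (default 1)
def Pre_solution (parameters : List (String × Int)) : Prop :=
  0 < PySem.Dict.getD (PySem.Dict.ofList parameters) "m" 1 ∧ 0 < PySem.Dict.getD (PySem.Dict.ofList parameters) "n" 1
instance (parameters : List (String × Int)) : Decidable (Pre_solution parameters) := by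
  unfold Pre_solution; infer_instance

def pvWitness_solution : (List (String × Int)) := [("m", 2), ("n", 3)]

def Spec_solution (parameters : List (String × Int)) (out : List (List Int)) : Prop := out = solution_alt parameters
instance (parameters : List (String × Int)) (out : List (List Int)) : Decidable (Spec_solution parameters out) := by unfold Spec_solution; infer_instance

-- ===== CLAIM (what is proved, stated in full; the proofs are below) =====
def Claim_equal_solution : Prop := ∀ (parameters : List (String × Int)), Dom_solution parameters → Pre_solution parameters → Spec_solution parameters (solution parameters)

-- ===== LEMMAS AND PROOFS =====

-- matrix whose cell (x, y) holds g x y, rows 0..m, columns 0..n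
def pvMk (m n : Int) (g : Int → Int → Int) : List (List Int) :=
  (PySem.List.pyRange 0 (m + 1) 1).map (fun i => (PySem.List.pyRange 0 (n + 1) 1).map (g i))

theorem pvMk_congr (m n : Int) (g h : Int → Int → Int)
    (H : ∀ x y, 0 ≤ x → x ≤ m → 0 ≤ y → y ≤ n → g x y = h x y) :
    pvMk m n g = pvMk m n h := by
  unfold pvMk
  refine List.map_congr_left (fun x hx => ?_)
  rw [PySem.List.mem_pyRange_one] at hx
  refine List.map_congr_left (fun y hy => ?_)
  rw [PySem.List.mem_pyRange_one] at hy
  exact H x y hx.1 (by omega) hy.1 (by omega)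

theorem pvSet_map_range {α : Type} (f : Int → α) (N i : Int) (v : α)
    (h0 : 0 ≤ i) (_h1 : i < N) :
    ((PySem.List.pyRange 0 N 1).map f).set i.toNat v
      = (PySem.List.pyRange 0 N 1).map (fun x => if x = i then v else f x) := by
  apply List.ext_getElem
  · simp
  · intro k hk1 hk2
    rw [List.getElem_set]
    rw [List.getElem_map, List.getElem_map, PySem.List.getElem_pyRange_one]
    split_ifs with hik hxk hxk
    · rfl
    · exfalso; omega
    · exfalso; omega
    · rfl

theorem pvGetCell_mk (m n : Int) (g : Int → Int → Int) (i j : Int)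
    (hi0 : 0 ≤ i) (hi1 : i ≤ m) (hj0 : 0 ≤ j) (hj1 : j ≤ n) :
    pvGetCell (pvMk m n g) i j = g i j := by
  unfold pvGetCell pvMk
  rw [PySem.List.pyGetD_map_pyRange_of_nonneg _ _ _ _ hi0 (by omega)]
  rw [PySem.List.pyGetD_map_pyRange_of_nonneg _ _ _ _ hj0 (by omega)]

theorem pvSetCell_mk (m n : Int) (g : Int → Int → Int) (i j : Int) (v : Int)
    (hi0 : 0 ≤ i) (hi1 : i ≤ m) (hj0 : 0 ≤ j) (hj1 : j ≤ n) :
    pvSetCell (pvMk m n g) i j v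
      = pvMk m n (fun x y => if x = i ∧ y = j then v else g x y) := by
  unfold pvSetCell pvMk
  rw [PySem.List.pyGetD_map_pyRange_of_nonneg _ _ _ _ hi0 (by omega)]
  rw [PySem.List.pySetD_of_nonneg _ _ hj0,
      PySem.List.pySetD_of_nonneg _ _ hi0]
  rw [pvSet_map_range (g i) (n + 1) j v hj0 (by omega)]
  rw [pvSet_map_range _ (m + 1) i _ hi0 (by omega)]
  refine List.map_congr_left (fun x hx => ?_)
  by_cases hxi : x = i
  · subst hxi
    simp only [if_pos]
    refine List.map_congr_left (fun y hy => ?_)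
    by_cases hyj : y = j
    · simp [hyj]
    · simp [hyj]
  · simp only [if_neg hxi]
    refine List.map_congr_left (fun y hy => ?_)
    have hne : ¬ (x = i ∧ y = j) := fun h => hxi h.1
    simp [hne]

theorem pvColV_val (n a : Int) (h0 : 0 ≤ a) (h1 : a < n) :
    PySem.List.pyGetD (PySem.List.pyRange 1 (n + 1) 1) a 0 = a + 1 := by
  rw [PySem.List.pyGetD_eq_getElem _ _ h0
      (by rw [PySem.List.length_pyRange_one]; omega)]
  rw [PySem.List.getElem_pyRange_one]
  omega

theorem pvRowV_val (m n a : Int) (h0 : 0 ≤ a) (h1 : a < m) :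
    PySem.List.pyGetD ((PySem.List.pyRange 1 (m + 1) 1).map (fun i => i * (n + 1))) a 0
      = (a + 1) * (n + 1) := by
  rw [PySem.List.pyGetD_eq_getElem _ _ h0
      (by rw [List.length_map, PySem.List.length_pyRange_one]; omega)]
  rw [List.getElem_map, PySem.List.getElem_pyRange_one]
  have h : (1 : Int) + ↑a.toNat = a + 1 := by omega
  rw [h]

-- Phase 1: fill the top row for columns a+1..n
theorem pvLoop1 (m n : Int) (hm : 0 < m) (_hn : 0 < n) :
    ∀ (k : Nat) (a : Int), 0 ≤ a → (n - a).toNat = k → ∀ (g : Int → Int → Int),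
    (PySem.List.pyRange a n 1).foldl
      (fun mat j => pvSetCell mat 0 (j + 1)
        (PySem.List.pyGetD (PySem.List.pyRange 1 (n + 1) 1) j 0)) (pvMk m n g)
    = pvMk m n (fun x y => if x = 0 ∧ a + 1 ≤ y ∧ y ≤ n then y else g x y) := by
  intro k
  induction k with
  | zero =>
    intro a ha hk g
    rw [show PySem.List.pyRange a n 1 = [] from PySem.List.pyRange_one_eq_nil (by omega)]
    simp only [List.foldl_nil]
    refine pvMk_congr _ _ _ _ (fun x y _ _ _ _ => ?_)
    have h : ¬ (x = 0 ∧ a + 1 ≤ y ∧ y ≤ n) := by omega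
    exact (if_neg h).symm
  | succ k ih =>
    intro a ha hk g
    have hlt : a < n := by omega
    rw [PySem.List.pyRange_one_cons hlt]
    simp only [List.foldl_cons]
    rw [pvColV_val n a ha hlt]
    rw [pvSetCell_mk m n g 0 (a + 1) (a + 1) (le_refl 0) (by omega) (by omega) (by omega)]
    rw [ih (a + 1) (by omega) (by omega) _]
    refine pvMk_congr _ _ _ _ (fun x y _ _ _ _ => ?_)
    split_ifs <;> first | rfl | omega

-- Phase 2: fill the first column for rows a+1..m
theorem pvLoop2 (m n : Int) (_hm : 0 < m) (hn : 0 < n) :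
    ∀ (k : Nat) (a : Int), 0 ≤ a → (m - a).toNat = k → ∀ (g : Int → Int → Int),
    (PySem.List.pyRange a m 1).foldl
      (fun mat i => pvSetCell mat (i + 1) 0
        (PySem.List.pyGetD ((PySem.List.pyRange 1 (m + 1) 1).map (fun i => i * (n + 1))) i 0))
      (pvMk m n g)
    = pvMk m n (fun x y => if y = 0 ∧ a + 1 ≤ x ∧ x ≤ m then x * (n + 1) else g x y) := by
  intro k
  induction k with
  | zero =>
    intro a ha hk g
    rw [show PySem.List.pyRange a m 1 = [] from PySem.List.pyRange_one_eq_nil (by omega)]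
    simp only [List.foldl_nil]
    refine pvMk_congr _ _ _ _ (fun x y _ _ _ _ => ?_)
    have h : ¬ (y = 0 ∧ a + 1 ≤ x ∧ x ≤ m) := by omega
    exact (if_neg h).symm
  | succ k ih =>
    intro a ha hk g
    have hlt : a < m := by omega
    rw [PySem.List.pyRange_one_cons hlt]
    simp only [List.foldl_cons]
    rw [pvRowV_val m n a ha hlt]
    rw [pvSetCell_mk m n g (a + 1) 0 ((a + 1) * (n + 1)) (by omega) (by omega) (le_refl 0) (by omega)]
    rw [ih (a + 1) (by omega) (by omega) _]
    refine pvMk_congr _ _ _ _ (fun x y _ _ _ _ => ?_)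
    by_cases hx : x = a + 1
    · subst hx; split_ifs <;> first | rfl | omega
    · split_ifs <;> first | rfl | omega

-- the state of the matrix after phases 1 and 2
def pvG2 (m n : Int) (x y : Int) : Int :=
  if y = 0 ∧ 1 ≤ x ∧ x ≤ m then x * (n + 1)
  else if x = 0 ∧ 1 ≤ y ∧ y ≤ n then y else 0

-- partial state during phase 3: rows < a fully done, row a done for columns < b
def pvP (m n a b : Int) (x y : Int) : Int :=
  if y = 0 ∨ x = 0 then pvG2 m n x y
  else if x < a ∨ (x = a ∧ y < b) then (n + 1) * (m + 2) - x * (n + 1) - y else 0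

theorem pvLoop3Inner (m n : Int) (hm : 0 < m) (hn : 0 < n) (a : Int)
    (ha1 : 1 ≤ a) (ha2 : a ≤ m) :
    ∀ (k : Nat) (b : Int), 1 ≤ b → (n + 1 - b).toNat = k →
    (PySem.List.pyRange b (n + 1) 1).foldl
      (fun mat j => pvSetCell mat a j
        ((n + 1) * (m + 2) - pvGetCell mat a 0 - pvGetCell mat 0 j))
      (pvMk m n (pvP m n a b))
    = pvMk m n (pvP m n a (n + 1)) := by
  intro k
  induction k with
  | zero =>
    intro b hb hk
    rw [show PySem.List.pyRange b (n + 1) 1 = [] from PySem.List.pyRange_one_eq_nil (by omega)]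
    simp only [List.foldl_nil]
    refine pvMk_congr _ _ _ _ (fun x y _ _ _ hy => ?_)
    unfold pvP
    split_ifs <;> first | rfl | omega
  | succ k ih =>
    intro b hb hk
    have hlt : b < n + 1 := by omega
    rw [PySem.List.pyRange_one_cons hlt]
    simp only [List.foldl_cons]
    rw [pvGetCell_mk m n _ a 0 (by omega) ha2 (le_refl 0) (by omega)]
    rw [pvGetCell_mk m n _ 0 b (le_refl 0) (by omega) (by omega) (by omega)]
    have hA : pvP m n a b a 0 = a * (n + 1) := by
      unfold pvP pvG2; split_ifs <;> first | rfl | omega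
    have hB : pvP m n a b 0 b = b := by
      unfold pvP pvG2; split_ifs <;> first | rfl | omega
    rw [hA, hB]
    rw [pvSetCell_mk m n _ a b _ (by omega) ha2 (by omega) (by omega)]
    have hmid : (fun x y => if x = a ∧ y = b
          then (n + 1) * (m + 2) - a * (n + 1) - b else pvP m n a b x y)
        = pvP m n a (b + 1) := by
      funext x y
      by_cases hxy : x = a ∧ y = b
      · obtain ⟨hx, hy⟩ := hxy; subst hx; subst hy
        unfold pvP pvG2
        split_ifs <;> first | rfl | omega
      · unfold pvP pvG2
        split_ifs <;> first | rfl | omega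
    rw [hmid, ih (b + 1) (by omega) (by omega)]

theorem pvLoop3 (m n : Int) (hm : 0 < m) (hn : 0 < n) :
    ∀ (k : Nat) (a : Int), 1 ≤ a → (m + 1 - a).toNat = k →
    (PySem.List.pyRange a (m + 1) 1).foldl
      (fun mat i => (PySem.List.pyRange 1 (n + 1) 1).foldl
        (fun mat j => pvSetCell mat i j
          ((n + 1) * (m + 2) - pvGetCell mat i 0 - pvGetCell mat 0 j)) mat)
      (pvMk m n (pvP m n a 1))
    = pvMk m n (pvP m n (m + 1) 1) := by
  intro k
  induction k with
  | zero =>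
    intro a ha hk
    rw [show PySem.List.pyRange a (m + 1) 1 = [] from PySem.List.pyRange_one_eq_nil (by omega)]
    simp only [List.foldl_nil]
    refine pvMk_congr _ _ _ _ (fun x y _ _ _ _ => ?_)
    unfold pvP
    split_ifs <;> first | rfl | omega
  | succ k ih =>
    intro a ha hk
    have hlt : a < m + 1 := by omega
    rw [PySem.List.pyRange_one_cons hlt]
    simp only [List.foldl_cons]
    rw [pvLoop3Inner m n hm hn a ha (by omega) (n + 1 - 1).toNat 1 (le_refl 1) rfl]
    have hstep : pvMk m n (pvP m n a (n + 1)) = pvMk m n (pvP m n (a + 1) 1) := by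
      refine pvMk_congr _ _ _ _ (fun x y _ hx _ hy => ?_)
      unfold pvP
      split_ifs <;> first | rfl | omega
    rw [hstep, ih (a + 1) (by omega) (by omega)]

-- ===== B-side lemmas: the row recurrence =====

-- row i of the finished matrix (i ≥ 1): first column i*(n+1), then the edge labels
def pvRow (m n i : Int) : List Int :=
  i * (n + 1) :: (PySem.List.pyRange 1 (n + 1) 1).map (fun j => (n + 1) * (m + 2) - i * (n + 1) - j)

-- one application of B's delta update sends pvRow i to pvRow (i+1)
theorem pvStep (m n i : Int) :
    ((PySem.List.pyGetD (pvRow m n i) 0 0 + (n + 1)) ::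
      (PySem.List.slice (pvRow m n i) (some 1) none).map (fun x => x - (n + 1)))
    = pvRow m n (i + 1) := by
  unfold pvRow
  rw [show ((some (1 : Int)) = some ((1 : Nat) : Int)) from rfl,
      PySem.List.slice_from_natCast]
  rw [PySem.List.pyGetD_eq_getElem _ _ (le_refl 0) (by simp)]
  simp only [List.drop_succ_cons, List.drop_zero, List.map_map,
    Int.toNat_zero, List.getElem_cons_zero]
  congr 1
  · show i * (n + 1) + (n + 1) = (i + 1) * (n + 1); ring
  · refine List.map_congr_left (fun j _ => ?_)
    show (n + 1) * (m + 2) - i * (n + 1) - j - (n + 1)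
        = (n + 1) * (m + 2) - (i + 1) * (n + 1) - j
    ring

-- B's loop invariant: starting at row a+1 with accumulated rows L
theorem pvLoopB (m n : Int) :
    ∀ (k : Nat) (a : Int), 0 ≤ a → (m - a).toNat = k → ∀ (L : List (List Int)),
    ((PySem.List.pyRange a m 1).foldl
      (fun (st : List (List Int) × List Int) _ =>
        (st.1 ++ [st.2],
         (PySem.List.pyGetD st.2 0 0 + (n + 1)) ::
           (PySem.List.slice st.2 (some 1) none).map (fun x => x - (n + 1))))
      (L, pvRow m n (a + 1))).1
    = L ++ (PySem.List.pyRange (a + 1) (m + 1) 1).map (pvRow m n) := by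
  intro k
  induction k with
  | zero =>
    intro a ha hk L
    rw [show PySem.List.pyRange a m 1 = [] from PySem.List.pyRange_one_eq_nil (by omega),
        show PySem.List.pyRange (a + 1) (m + 1) 1 = [] from
          PySem.List.pyRange_one_eq_nil (by omega)]
    simp
  | succ k ih =>
    intro a ha hk L
    have hlt : a < m := by omega
    rw [PySem.List.pyRange_one_cons hlt]
    simp only [List.foldl_cons]
    rw [pvStep]
    rw [ih (a + 1) (by omega) (by omega) (L ++ [pvRow m n (a + 1)])]
    rw [PySem.List.pyRange_one_cons (show a + 1 < m + 1 by omega)]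
    simp

theorem pvMain (parameters : List (String × Int))
    (pre : Pre_solution parameters) :
    solution parameters = solution_alt parameters := by
  obtain ⟨hm, hn⟩ := pre
  simp only [solution, solution_alt]
  generalize hM : PySem.Dict.getD (PySem.Dict.ofList parameters) "m" 1 = m at hm ⊢
  generalize hN : PySem.Dict.getD (PySem.Dict.ofList parameters) "n" 1 = n at hn ⊢
  rw [if_neg (by omega), if_neg (by omega)]
  -- A side: reduce to the closed-form matrix pvMk (pvP (m+1) 1)
  have h0 : (PySem.List.pyRange 0 (m + 1) 1).map
      (fun _ => (PySem.List.pyRange 0 (n + 1) 1).map (fun _ => (0 : Int)))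
      = pvMk m n (fun _ _ => 0) := rfl
  rw [h0]
  rw [pvLoop1 m n hm hn (n - 0).toNat 0 (le_refl 0) rfl (fun _ _ => 0)]
  rw [pvLoop2 m n hm hn (m - 0).toNat 0 (le_refl 0) rfl _]
  have h2 : pvMk m n (fun x y => if y = 0 ∧ 0 + 1 ≤ x ∧ x ≤ m then x * (n + 1)
      else if x = 0 ∧ 0 + 1 ≤ y ∧ y ≤ n then y else (0 : Int))
      = pvMk m n (pvP m n 1 1) := by
    refine pvMk_congr _ _ _ _ (fun x y _ _ _ _ => ?_)
    unfold pvP pvG2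
    split_ifs <;> first | rfl | omega
  rw [h2]
  rw [pvLoop3 m n hm hn (m + 1 - 1).toNat 1 (le_refl 1) rfl]
  -- B side: the initial body row is pvRow 1, then the loop invariant applies
  have hrow1 : ((n + 1) :: (PySem.List.pyRange 1 (n + 1) 1).map
      (fun j => (n + 1) * (m + 2) - (n + 1) - j)) = pvRow m n (0 + 1) := by
    unfold pvRow
    congr 1
    · show (n + 1) = (0 + 1) * (n + 1); ring
    · refine List.map_congr_left (fun j _ => ?_)
      show (n + 1) * (m + 2) - (n + 1) - j = (n + 1) * (m + 2) - (0 + 1) * (n + 1) - j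
      ring
  rw [hrow1, pvLoopB m n (m - 0).toNat 0 (le_refl 0) rfl [PySem.List.pyRange 0 (n + 1) 1]]
  -- the two sides coincide cell by cell
  rw [show ([PySem.List.pyRange 0 (n + 1) 1]
        ++ (PySem.List.pyRange (0 + 1) (m + 1) 1).map (pvRow m n))
      = PySem.List.pyRange 0 (n + 1) 1
        :: (PySem.List.pyRange 1 (m + 1) 1).map (pvRow m n) from by simp]
  unfold pvMk
  rw [PySem.List.pyRange_one_cons (show (0 : Int) < m + 1 by omega)]
  simp only [List.map_cons]
  congr 1
  · -- top row: pvP (m+1) 1 0 y = y on 0..n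
    have h : (PySem.List.pyRange 0 (n + 1) 1).map (fun y => pvP m n (m + 1) 1 0 y)
        = (PySem.List.pyRange 0 (n + 1) 1).map (fun y => y) := by
      refine List.map_congr_left (fun y hy => ?_)
      rw [PySem.List.mem_pyRange_one] at hy
      show pvP m n (m + 1) 1 0 y = y
      unfold pvP pvG2
      split_ifs <;> first | rfl | omega
    rw [h, List.map_id_fun']; rfl
  · refine List.map_congr_left (fun i hi => ?_)
    rw [PySem.List.mem_pyRange_one] at hi
    unfold pvRow
    rw [PySem.List.pyRange_one_cons (show (0 : Int) < n + 1 by omega)]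
    simp only [List.map_cons]
    congr 1
    · unfold pvP pvG2
      split_ifs <;> first | rfl | omega
    · refine List.map_congr_left (fun j hj => ?_)
      rw [PySem.List.mem_pyRange_one] at hj
      unfold pvP pvG2
      split_ifs <;> first | rfl | omega

-- ===== VERDICT (by name: the statement is the Claim_ definition above) =====
theorem solution_spec : Claim_equal_solution := by
  intro parameters _ pre
  unfold Spec_solution
  exact pvMain parameters pre
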